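-- pv_equiv track=rewrite | github.com/nlp-unibuc/clpsych24-task | src/make_GOML_LLM_submission3.py | find_N_spaces_forward
-- ===== SOURCE A (Python) =====
-- def find_N_spaces_forward(text, position, N):
--     spaces = 0
--     for i in range(position, len(text)):
--         if text[i] == ' ':
--             spaces += 1
--             if spaces == N:
--                 return i
--         elif text[i] in {'.', '!', '?'}:
--             return i
--     return len(text)
-- ===== SOURCE B (Python) =====
-- def _punct_index(tail):
--     j = 0
--     for ch in tail:
--         if ch in '.!?':
--             return j
--         j += 1
--     return j
--
-- def _nth_space_index(tail, N):
--     j = 0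
--     for ch in tail:
--         if ch == ' ':
--             if N == 1:
--                 return j
--             N -= 1
--         j += 1
--     return j
--
-- def find_N_spaces_forward(text, position, N):
--     start = min(position, len(text))
--     tail = text[start:]
--     return start + min(_punct_index(tail), _nth_space_index(tail, N))
-- ===== Notes on version B (the rewrite author's own statement) =====
-- stated objective: alternative
-- what changed: Replaces A's single fused counting loop by two independent scans of the tail (first sentence-punctuation index and Nth-space index, each with sentinel len(tail)) combined with min; Pre_ restricts to the natural domain 0 <= position, since a negative position makes A scan via negative-index wraparound (a suffix and then the whole text again), or raise IndexError when position < -len(text).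
-- outside the precondition, e.g. on find_N_spaces_forward('ab c', -1, 1): A returns 2, B returns 0; on find_N_spaces_forward('hi', -5, 1): A raises IndexError, B returns -3
import Mathlib
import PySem

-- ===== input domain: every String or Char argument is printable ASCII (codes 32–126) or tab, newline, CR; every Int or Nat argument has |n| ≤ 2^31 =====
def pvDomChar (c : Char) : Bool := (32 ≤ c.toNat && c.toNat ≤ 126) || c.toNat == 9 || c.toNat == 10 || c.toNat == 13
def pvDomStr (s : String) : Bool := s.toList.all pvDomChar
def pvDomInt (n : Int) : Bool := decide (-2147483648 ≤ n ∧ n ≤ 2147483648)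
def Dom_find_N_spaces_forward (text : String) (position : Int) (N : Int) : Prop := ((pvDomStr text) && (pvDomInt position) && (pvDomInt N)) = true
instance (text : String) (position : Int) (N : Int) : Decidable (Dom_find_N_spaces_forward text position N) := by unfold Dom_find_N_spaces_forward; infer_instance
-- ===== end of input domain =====

-- B replaces A's single fused counting loop by two independent scans of the tail
-- (first-punctuation index and Nth-space index, sentinel = length) combined with min
-- (objective: alternative decomposition; same cost).

-- ===== PORT A =====
-- the for-loop over range(position, len(text)) with the 'spaces' accumulator
def pvAGo (text : List Char) (N : Int) : List Int → Int → Int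
  | [], _ => (text.length : Int)
  | i :: rest, spaces =>
    match PySem.List.pyGet? text i with
    | none => 0  -- IndexError in Python; unreachable under Pre_
    | some c =>
      if c = ' ' then
        if spaces + 1 = N then i else pvAGo text N rest (spaces + 1)
      else if c = '.' ∨ c = '!' ∨ c = '?' then i
      else pvAGo text N rest spaces

def find_N_spaces_forward (text : String) (position : Int) (N : Int) : Int :=
  pvAGo text.toList N (PySem.List.pyRange position (text.toList.length : Int) 1) 0

-- ===== PORT B =====
-- _punct_index: first index of '.', '!' or '?' in tail, or len(tail)
def pvPunctGo : List Char → Int → Int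
  | [], j => j
  | c :: r, j => if c = '.' ∨ c = '!' ∨ c = '?' then j else pvPunctGo r (j + 1)

-- _nth_space_index: index of the Nth ' ' in tail, or len(tail)
def pvNthSpaceGo : List Char → Int → Int → Int
  | [], _, j => j
  | c :: r, N, j =>
    if c = ' ' then (if N = 1 then j else pvNthSpaceGo r (N - 1) (j + 1))
    else pvNthSpaceGo r N (j + 1)

def find_N_spaces_forward_alt (text : String) (position : Int) (N : Int) : Int :=
  let tl := text.toList
  let start := min position (tl.length : Int)
  let tail := PySem.List.slice tl (some start) none
  start + min (pvPunctGo tail 0) (pvNthSpaceGo tail N 0)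

-- ===== PRECONDITION & SPEC =====
-- Pre_ restricts to the natural domain 0 ≤ position: on a negative position A scans via
-- negative-index wraparound (a suffix and then the whole text again), or raises IndexError
-- when position < -len(text).
def Pre_find_N_spaces_forward (text : String) (position : Int) (N : Int) : Prop := 0 ≤ position
instance (text : String) (position : Int) (N : Int) : Decidable (Pre_find_N_spaces_forward text position N) := by unfold Pre_find_N_spaces_forward; infer_instance

def pvWitness_find_N_spaces_forward : String × Int × Int := ("a b. c", 0, 2)

def Spec_find_N_spaces_forward (text : String) (position : Int) (N : Int) (out : Int) : Prop := out = find_N_spaces_forward_alt text position N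
instance (text : String) (position : Int) (N : Int) (out : Int) : Decidable (Spec_find_N_spaces_forward text position N out) := by unfold Spec_find_N_spaces_forward; infer_instance

-- ===== CLAIM (what is proved, stated in full; the proofs are below) =====
def Claim_equal_find_N_spaces_forward : Prop := ∀ (text : String) (position : Int) (N : Int), Dom_find_N_spaces_forward text position N → Pre_find_N_spaces_forward text position N → Spec_find_N_spaces_forward text position N (find_N_spaces_forward text position N)

-- ===== LEMMAS AND PROOFS =====

theorem pvPunctGo_shift (r : List Char) (j : Int) :
    pvPunctGo r j = j + pvPunctGo r 0 := by
  induction r generalizing j with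
  | nil => simp [pvPunctGo]
  | cons c r ih =>
    simp only [pvPunctGo]
    split_ifs with h
    · omega
    · rw [ih (j + 1), ih (0 + 1)]; omega

theorem pvNthSpaceGo_shift (r : List Char) (N j : Int) :
    pvNthSpaceGo r N j = j + pvNthSpaceGo r N 0 := by
  induction r generalizing N j with
  | nil => simp [pvNthSpaceGo]
  | cons c r ih =>
    simp only [pvNthSpaceGo]
    split_ifs with h hn
    · omega
    · rw [ih (N - 1) (j + 1), ih (N - 1) (0 + 1)]; omega
    · rw [ih N (j + 1), ih N (0 + 1)]; omega

theorem pvPunctGo_cons_hit (c : Char) (r : List Char) (h : c = '.' ∨ c = '!' ∨ c = '?') :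
    pvPunctGo (c :: r) 0 = 0 := by
  simp only [pvPunctGo]; rw [if_pos h]

theorem pvPunctGo_cons_miss (c : Char) (r : List Char) (h : ¬(c = '.' ∨ c = '!' ∨ c = '?')) :
    pvPunctGo (c :: r) 0 = 1 + pvPunctGo r 0 := by
  simp only [pvPunctGo]; rw [if_neg h, pvPunctGo_shift r (0 + 1)]; omega

theorem pvNthSpaceGo_cons_hit (r : List Char) (N : Int) (h : N = 1) :
    pvNthSpaceGo (' ' :: r) N 0 = 0 := by
  simp [pvNthSpaceGo, h]

theorem pvNthSpaceGo_cons_space (r : List Char) (N : Int) (h : N ≠ 1) :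
    pvNthSpaceGo (' ' :: r) N 0 = 1 + pvNthSpaceGo r (N - 1) 0 := by
  simp only [pvNthSpaceGo, if_true]
  rw [if_neg h, pvNthSpaceGo_shift r (N - 1) (0 + 1)]; omega

theorem pvNthSpaceGo_cons_other (c : Char) (r : List Char) (N : Int) (h : c ≠ ' ') :
    pvNthSpaceGo (c :: r) N 0 = 1 + pvNthSpaceGo r N 0 := by
  simp only [pvNthSpaceGo]
  rw [if_neg h, pvNthSpaceGo_shift r N (0 + 1)]; omega

theorem pvPunctGo_nonneg (r : List Char) : 0 ≤ pvPunctGo r 0 := by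
  induction r with
  | nil => simp [pvPunctGo]
  | cons c r ih =>
    by_cases h : c = '.' ∨ c = '!' ∨ c = '?'
    · rw [pvPunctGo_cons_hit c r h]
    · rw [pvPunctGo_cons_miss c r h]; omega

theorem pvNthSpaceGo_nonneg (r : List Char) (N : Int) : 0 ≤ pvNthSpaceGo r N 0 := by
  induction r generalizing N with
  | nil => simp [pvNthSpaceGo]
  | cons c r ih =>
    by_cases h : c = ' '
    · subst h
      by_cases hn : N = 1
      · rw [pvNthSpaceGo_cons_hit r N hn]
      · rw [pvNthSpaceGo_cons_space r N hn]
        have := ih (N - 1); omega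
    · rw [pvNthSpaceGo_cons_other c r N h]
      have := ih N; omega

theorem pvAGo_main (tail l : List Char) (k : Nat) (N spaces : Int)
    (hd : l.drop k = tail) (hk : k ≤ l.length) :
    pvAGo l N (PySem.List.pyRange (k : Int) (l.length : Int) 1) spaces
      = (k : Int) + min (pvPunctGo tail 0) (pvNthSpaceGo tail (N - spaces) 0) := by
  induction tail generalizing k spaces with
  | nil =>
    have hkl : k = l.length := by
      have := List.drop_eq_nil_iff.mp hd; omega
    subst hkl
    rw [PySem.List.pyRange_one_eq_nil (by omega)]
    simp [pvAGo, pvPunctGo, pvNthSpaceGo]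
  | cons c r ih =>
    have hlen : k < l.length := by
      by_contra h
      rw [List.drop_eq_nil_of_le (by omega)] at hd
      exact List.cons_ne_nil c r hd.symm
    have hget : PySem.List.pyGet? l (k : Int) = some c := by
      rw [PySem.List.pyGet?_natCast]
      have : (l.drop k)[0]? = some c := by rw [hd]; rfl
      rwa [List.getElem?_drop, Nat.add_zero] at this
    have hd' : l.drop (k + 1) = r := by
      have h1 : (l.drop k).drop 1 = l.drop (k + 1) := by rw [List.drop_drop]
      rw [← h1, hd]; rfl
    rw [PySem.List.pyRange_one_cons (by omega)]
    simp only [pvAGo, hget]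
    have hstep : ((k : Int) + 1) = ((k + 1 : Nat) : Int) := by push_cast; omega
    by_cases hc : c = ' '
    · subst hc
      rw [if_pos rfl]
      by_cases hN : spaces + 1 = N
      · rw [if_pos hN, pvPunctGo_cons_miss ' ' r (by simp),
            pvNthSpaceGo_cons_hit r (N - spaces) (by omega)]
        have := pvPunctGo_nonneg r
        omega
      · rw [if_neg hN, hstep, ih (k + 1) (spaces + 1) hd' (by omega),
            pvPunctGo_cons_miss ' ' r (by simp),
            pvNthSpaceGo_cons_space r (N - spaces) (by omega)]
        have h2 : N - (spaces + 1) = N - spaces - 1 := by omega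
        rw [h2]
        omega
    · rw [if_neg hc]
      by_cases hp : c = '.' ∨ c = '!' ∨ c = '?'
      · rw [if_pos hp, pvPunctGo_cons_hit c r hp, pvNthSpaceGo_cons_other c r (N - spaces) hc]
        have := pvNthSpaceGo_nonneg r (N - spaces)
        omega
      · rw [if_neg hp, hstep, ih (k + 1) spaces hd' (by omega),
            pvPunctGo_cons_miss c r hp, pvNthSpaceGo_cons_other c r (N - spaces) hc]
        omega

-- ===== VERDICT (by name: the statement is the Claim_ definition above) =====
theorem find_N_spaces_forward_spec : Claim_equal_find_N_spaces_forward := by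
  intro text position N _hdom hpre
  unfold Spec_find_N_spaces_forward
  have hpos : 0 ≤ position := hpre
  simp only [find_N_spaces_forward, find_N_spaces_forward_alt]
  set l := text.toList with hl
  by_cases h : position ≤ (l.length : Int)
  · have hmin : min position (l.length : Int) = position := by omega
    have hcast : ((position.toNat : Nat) : Int) = position := by omega
    rw [hmin, PySem.List.slice_from l hpos, ← hcast,
        pvAGo_main (l.drop position.toNat) l position.toNat N 0 rfl (by omega)]
    have hmax : max position 0 = position := by omega
    simp [hmax]
  · have hmin : min position (l.length : Int) = (l.length : Int) := by omega
    rw [hmin, PySem.List.pyRange_one_eq_nil (by omega),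
        PySem.List.slice_from l (by omega)]
    have hln : ((l.length : Int)).toNat = l.length := by omega
    rw [hln, List.drop_length]
    simp [pvAGo, pvPunctGo, pvNthSpaceGo]
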